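-- pv_equiv track=rewrite | github.com/InformationSecurityHIT/processServer | process/process_one_img_for_match.py | calculate_max4
-- ===== SOURCE A (Python) =====
-- import heapq
--
-- def calculate_max4(result):
--     res=[]
--     sum_res=[]
--     for result_tmp in result:
--         res.append(heapq.nlargest(5, result_tmp))
--     for result_tmp in res:
--         sum_res.append(sum(result_tmp))
--     return sum_res.index(max(sum_res))
-- ===== SOURCE B (Python) =====
-- def calculate_max4(result):
--     best_i = None
--     best_s = None
--     for i, row in enumerate(result):
--         s = sum(sorted(row, reverse=True)[:5])
--         if best_s is None or s > best_s:
--             best_i, best_s = i, s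
--     if best_i is None:
--         raise ValueError("calculate_max4: empty input")
--     return best_i
-- ===== Notes on version B (the rewrite author's own statement) =====
-- stated objective: simpler
-- what changed: Single enumerate pass keeping a running (best_index, best_sum) with strict > so ties keep the first index, instead of building the intermediate res and sum_res lists and calling index(max(...)).
-- outside the precondition, e.g. on calculate_max4([]): A raises ValueError, B raises ValueError
import Mathlib
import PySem

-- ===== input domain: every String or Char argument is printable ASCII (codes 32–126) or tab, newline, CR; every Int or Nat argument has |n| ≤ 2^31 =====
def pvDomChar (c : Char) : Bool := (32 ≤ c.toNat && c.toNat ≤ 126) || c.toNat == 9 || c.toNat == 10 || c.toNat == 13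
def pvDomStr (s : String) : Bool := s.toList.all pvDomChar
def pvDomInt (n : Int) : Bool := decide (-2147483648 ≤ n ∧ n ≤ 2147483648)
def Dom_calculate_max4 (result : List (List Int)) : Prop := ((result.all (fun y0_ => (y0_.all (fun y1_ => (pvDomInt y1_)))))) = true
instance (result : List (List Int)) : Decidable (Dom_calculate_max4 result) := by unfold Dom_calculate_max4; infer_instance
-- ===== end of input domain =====

-- B replaces A's two intermediate lists and index(max(...)) by a single enumerate pass
-- with a running (best_index, best_sum) updated on strictly greater sums (objective: simpler).


-- ===== PORT A =====
-- heapq.nlargest(5, xs) = sorted(xs, reverse=True)[:5] (documented equivalence)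
def calculate_max4 (result : List (List Int)) : Int :=
  let res := result.foldl (fun acc r => acc ++ [(PySem.List.sorted r (fun x => x) true).take 5]) []
  let sum_res := res.foldl (fun acc r => acc ++ [r.sum]) []
  match PySem.List.max? sum_res (fun x => x) with
  | none => 0   -- Python: max([]) raises ValueError; excluded by Pre_
  | some m =>
    match PySem.List.index? sum_res m with
    | some i => (i : Int)
    | none => 0  -- unreachable: m ∈ sum_res

-- ===== PORT B =====
def calculate_max4_alt (result : List (List Int)) : Int :=
  let final := (PySem.List.enumerate result).foldl
    (fun (acc : Option (Int × Int)) (p : Int × List Int) =>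
      let s := ((PySem.List.sorted p.2 (fun x => x) true).take 5).sum
      match acc with
      | none => some (p.1, s)
      | some (bi, bs) => if bs < s then some (p.1, s) else some (bi, bs)) none
  match final with
  | some (bi, _) => bi
  | none => 0    -- Python: raise ValueError; excluded by Pre_

-- ===== PRECONDITION & SPEC =====
-- A raises ValueError (max of empty sequence) on [], and B raises ValueError there too.
def Pre_calculate_max4 (result : List (List Int)) : Prop := result ≠ []
instance (result : List (List Int)) : Decidable (Pre_calculate_max4 result) := by unfold Pre_calculate_max4; infer_instance
def pvWitness_calculate_max4 : List (List Int) := [[3, 1], [2, 2, 2]]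

def Spec_calculate_max4 (result : List (List Int)) (out : Int) : Prop := out = calculate_max4_alt result
instance (result : List (List Int)) (out : Int) : Decidable (Spec_calculate_max4 result out) := by unfold Spec_calculate_max4; infer_instance

-- ===== CLAIM (what is proved, stated in full; the proofs are below) =====
def Claim_equal_calculate_max4 : Prop := ∀ (result : List (List Int)), Dom_calculate_max4 result → Pre_calculate_max4 result → Spec_calculate_max4 result (calculate_max4 result)

-- ===== LEMMAS AND PROOFS =====

-- the per-row value both ports compute: sum of the 5 largest entries
def pvTop5 (r : List Int) : Int := ((PySem.List.sorted r (fun x => x) true).take 5).sum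

-- foldl-append builds the map
theorem pv_foldl_append_map {α β : Type} (f : α → β) (l : List α) (acc : List β) :
    l.foldl (fun a x => a ++ [f x]) acc = acc ++ l.map f := by
  induction l generalizing acc with
  | nil => simp
  | cons x t ih => simp [List.foldl, ih, List.append_assoc]

theorem pv_foldl_max_max (a b : Int) (l : List Int) :
    l.foldl max (max a b) = max a (l.foldl max b) := by
  induction l generalizing a b with
  | nil => rfl
  | cons c t ih =>
    simp only [List.foldl]
    rw [max_assoc, ih]

-- index (0-based within s::t) of the first maximum of s::t
def pvFmi (s : Int) (t : List Int) : Nat :=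
  match t with
  | [] => 0
  | x :: r => if t.all (fun y => decide (y ≤ s)) then 0 else 1 + pvFmi x r

theorem pv_fmi_le_head (s : Int) (t : List Int) (h : t.all (fun y => decide (y ≤ s))) :
    pvFmi s t = 0 := by
  cases t with
  | nil => rfl
  | cons x r => simp [pvFmi, h]

theorem pv_foldl_max_of_all_le (s : Int) (t : List Int) (h : ∀ y ∈ t, y ≤ s) :
    t.foldl max s = s := by
  induction t generalizing s with
  | nil => rfl
  | cons x r ih =>
    simp only [List.foldl]
    have hx : max s x = s := max_eq_left (h x (by simp))
    rw [hx]; exact ih s (fun y hy => h y (by simp [hy]))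

theorem pv_fmi_congr (s s' : Int) (t : List Int)
    (h : ∃ y ∈ t, ¬ (y ≤ s)) (h' : ∃ y ∈ t, ¬ (y ≤ s')) :
    pvFmi s t = pvFmi s' t := by
  cases t with
  | nil => simp at h
  | cons x r =>
    have ha : ¬ ((x :: r).all (fun y => decide (y ≤ s)) = true) := by
      simp only [List.all_eq_true]; push_neg
      obtain ⟨y, hy, hys⟩ := h; exact ⟨y, hy, by simpa using hys⟩
    have hb : ¬ ((x :: r).all (fun y => decide (y ≤ s')) = true) := by
      simp only [List.all_eq_true]; push_neg
      obtain ⟨y, hy, hys⟩ := h'; exact ⟨y, hy, by simpa using hys⟩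
    simp [pvFmi, ha, hb]

-- A's answer on sums s :: t is pvFmi s t : index? of the first maximum
theorem pv_index_max (s : Int) (t : List Int) :
    PySem.List.index? (s :: t) (t.foldl max s) = some (pvFmi s t) := by
  induction t generalizing s with
  | nil => simp [pvFmi]
  | cons x r ih =>
    by_cases hall : ∀ y ∈ (x :: r), y ≤ s
    · have hfold : (x :: r).foldl max s = s := pv_foldl_max_of_all_le s _ hall
      rw [hfold, pv_fmi_le_head s (x :: r) (by simp only [List.all_eq_true]; intro y hy; simpa using hall y hy)]
      exact PySem.List.index?_cons_self s (x :: r)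
    · push_neg at hall
      obtain ⟨y, hy, hys⟩ := hall
      have hyle : y ≤ r.foldl max x := by
        rcases (by simpa using hy : y = x ∨ y ∈ r) with h | h
        · subst h; exact (PySem.List.le_foldl_max r y).1
        · exact (PySem.List.le_foldl_max r x).2 y h
      have hsle : s ≤ r.foldl max x := le_trans (le_of_lt hys) hyle
      have hm : (x :: r).foldl max s = r.foldl max x := by
        simp only [List.foldl]
        rw [pv_foldl_max_max s x r, max_eq_right hsle]
      have hslt : s < r.foldl max x := lt_of_lt_of_le hys hyle
      rw [hm, PySem.List.index?_cons_of_ne (x :: r) (ne_of_lt hslt), ih x]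
      have hx : ¬ ((x :: r).all (fun z => decide (z ≤ s)) = true) := by
        simp only [List.all_eq_true]; push_neg
        exact ⟨y, hy, by simpa using hys⟩
      simp [pvFmi, hx, Nat.add_comm]

-- B's loop as a pure recursion on the list of sums
def pvRun (k bi bs : Int) (t : List Int) : Int × Int :=
  match t with
  | [] => (bi, bs)
  | s :: r => if bs < s then pvRun (k + 1) k s r else pvRun (k + 1) bi bs r

theorem pv_run_spec (t : List Int) (k bi bs : Int) :
    pvRun k bi bs t =
      ((if t.all (fun y => decide (y ≤ bs)) then bi else (k - 1) + (pvFmi bs t : Int)),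
       t.foldl max bs) := by
  induction t generalizing k bi bs with
  | nil => simp [pvRun]
  | cons x r ih =>
    simp only [pvRun]
    by_cases hx : bs < x
    · rw [if_pos hx, ih]
      have hall : ¬ ((x :: r).all (fun y => decide (y ≤ bs)) = true) := by
        simp only [List.all_eq_true]; push_neg; exact ⟨x, by simp, by simpa using not_le.mpr hx⟩
      have hfold : (x :: r).foldl max bs = r.foldl max x := by
        simp only [List.foldl]; rw [max_eq_right (le_of_lt hx)]
      rw [hfold]
      simp only [pvFmi, hall]
      by_cases hr : r.all (fun y => decide (y ≤ x))
      · rw [if_pos hr, pv_fmi_le_head x r hr]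
        simp only [Bool.false_eq_true, if_false, Prod.mk.injEq]
        refine ⟨?_, trivial⟩
        push_cast; ring
      · rw [if_neg hr]
        simp only [Bool.false_eq_true, if_false, Prod.mk.injEq]
        refine ⟨?_, trivial⟩
        push_cast; ring
    · rw [if_neg hx, ih]
      have hxle : x ≤ bs := not_lt.mp hx
      have hfold : (x :: r).foldl max bs = r.foldl max bs := by
        simp only [List.foldl]; rw [max_eq_left hxle]
      rw [hfold]
      by_cases hr : r.all (fun y => decide (y ≤ bs))
      · have hall : ((x :: r).all (fun y => decide (y ≤ bs)) = true) := by
          simp only [List.all_eq_true] at hr ⊢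
          intro y hy; rcases (by simpa using hy : y = x ∨ y ∈ r) with h | h
          · subst h; simpa using hxle
          · exact hr y h
        simp [hr, hall]
      · have hall : ¬ ((x :: r).all (fun y => decide (y ≤ bs)) = true) := by
          simp only [List.all_eq_true] at hr ⊢; push_neg at hr ⊢
          obtain ⟨y, hy, hyb⟩ := hr; exact ⟨y, by simp [hy], hyb⟩
        simp only [if_neg hr, if_neg hall]

        have hex : ∃ y ∈ r, ¬ (y ≤ bs) := by
          simp only [List.all_eq_true] at hr; push_neg at hr
          obtain ⟨y, hy, hyb⟩ := hr; exact ⟨y, hy, by simpa using hyb⟩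
        have hex' : ∃ y ∈ r, ¬ (y ≤ x) := by
          obtain ⟨y, hy, hyb⟩ := hex; exact ⟨y, hy, fun h => hyb (le_trans h hxle)⟩
        have hfmi : pvFmi bs r = pvFmi x r := pv_fmi_congr bs x r hex hex'
        have hfmi2 : pvFmi bs (x :: r) = 1 + pvFmi x r := by
          simp [pvFmi, hall]
        rw [hfmi, hfmi2]
        simp only [Prod.mk.injEq]
        refine ⟨?_, trivial⟩
        push_cast; ring

-- B's foldl over the enumeration, from a some-state, is pvRun on the mapped sums
theorem pv_fold_enum (rows : List (List Int)) (k bi bs : Int) :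
    (PySem.List.enumerate rows k).foldl
      (fun (acc : Option (Int × Int)) (p : Int × List Int) =>
        match acc with
        | none => some (p.1, ((PySem.List.sorted p.2 (fun x => x) true).take 5).sum)
        | some (b, c) =>
          if c < ((PySem.List.sorted p.2 (fun x => x) true).take 5).sum then
            some (p.1, ((PySem.List.sorted p.2 (fun x => x) true).take 5).sum)
          else some (b, c)) (some (bi, bs))
      = some (pvRun k bi bs (rows.map pvTop5)) := by
  induction rows generalizing k bi bs with
  | nil => simp [PySem.List.enumerate_nil, pvRun]
  | cons r t ih =>
    rw [PySem.List.enumerate_cons]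
    simp only [List.foldl, List.map, pvRun, pvTop5]
    by_cases h : bs < ((PySem.List.sorted r (fun x => x) true).take 5).sum
    · simp only [if_pos h]
      exact ih (k + 1) k _
    · simp only [if_neg h]
      exact ih (k + 1) bi bs

-- ===== VERDICT (by name: the statement is the Claim_ definition above) =====
theorem calculate_max4_spec : Claim_equal_calculate_max4 := by
  intro result _ hpre
  unfold Spec_calculate_max4 calculate_max4 calculate_max4_alt
  cases result with
  | nil => exact absurd rfl hpre
  | cons r0 rest =>
    rw [PySem.List.enumerate_cons]
    simp only [List.foldl, pv_foldl_append_map, List.nil_append, zero_add]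
    rw [pv_fold_enum rest 1 0 (((PySem.List.sorted r0 (fun x => x) true).take 5).sum)]
    rw [show (List.map List.sum ([(PySem.List.sorted r0 (fun x => x) true).take 5] ++ List.map (fun x => (PySem.List.sorted x (fun x => x) true).take 5) rest)) = pvTop5 r0 :: rest.map pvTop5 from by simp [pvTop5, Function.comp]]
    rw [PySem.List.max?_id_cons]
    simp only [pv_index_max, pv_run_spec]
    rw [show ((PySem.List.sorted r0 (fun x => x) true).take 5).sum = pvTop5 r0 from rfl]
    by_cases hall : ((rest.map pvTop5).all (fun y => decide (y ≤ pvTop5 r0))) = true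
    · simp [hall, pv_fmi_le_head _ _ hall]
    · simp only [hall, if_false, Bool.false_eq_true]
      push_cast
      omega
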